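-- pv_equiv track=rewrite | github.com/hmnhGeek/Data-Structures-Algorithms | Practice Set 2/Sliding Windows/L2 - Maximum Points You Can Obtain from Cards.py | max_points_from_cards
-- ===== SOURCE A (Python) =====
-- def max_points_from_cards(cards, k):
--     if k <= 0:
--         return 0
--     if k >= len(cards):
--         return sum(cards)
--     left = k - 1
--     right = n = len(cards)
--     pts = _sum = sum(cards[:k])
--     while left >= 0:
--         new_pts = _sum - cards[left] + cards[right - 1]
--         left -= 1
--         right -= 1
--         pts = max(pts, new_pts)
--         _sum = new_pts
--     return pts
-- ===== SOURCE B (Python) =====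
-- def _running(xs):
--     # [0, xs[0], xs[0]+xs[1], ...]: running sums, length len(xs)+1
--     out = []
--     acc = 0
--     for x in xs:
--         out.append(acc)
--         acc += x
--     out.append(acc)
--     return out
--
--
-- def max_points_from_cards(cards, k):
--     if k <= 0:
--         return 0
--     n = len(cards)
--     if k >= n:
--         return sum(cards)
--     prefix = _running(cards[:k])          # prefix[i] = sum of leftmost i cards
--     suffix = _running(cards[-k:][::-1])   # suffix[j] = sum of rightmost j cards
--     cands = [p + s for p, s in zip(prefix, suffix[::-1])]  # split i: prefix[i]+suffix[k-i]
--     return max(cands)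
-- ===== Notes on version B (the rewrite author's own statement) =====
-- stated objective: alternative
-- what changed: Replaces A's backwards sliding window (mutating left/right/_sum state while scanning) with two precomputed running-sum tables (prefix of the first k, suffix of the last k) combined by a zip over all k+1 splits.
import Mathlib
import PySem

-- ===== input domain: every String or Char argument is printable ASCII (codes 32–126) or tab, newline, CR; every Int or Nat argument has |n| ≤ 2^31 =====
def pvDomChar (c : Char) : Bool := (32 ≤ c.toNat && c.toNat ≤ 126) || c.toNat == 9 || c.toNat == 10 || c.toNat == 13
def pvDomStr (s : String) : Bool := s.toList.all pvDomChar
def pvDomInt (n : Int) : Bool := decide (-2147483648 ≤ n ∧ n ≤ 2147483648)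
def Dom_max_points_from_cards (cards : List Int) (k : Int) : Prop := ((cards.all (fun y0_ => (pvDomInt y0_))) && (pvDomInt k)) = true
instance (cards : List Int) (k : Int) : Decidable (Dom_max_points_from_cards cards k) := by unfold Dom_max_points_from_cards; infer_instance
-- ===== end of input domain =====

-- B replaces A's backwards sliding window with two precomputed running-sum tables
-- (prefix of the first k, suffix of the last k) zipped over all k+1 splits; alternative
-- decomposition, same O(n) cost.

-- ===== PORT A =====
-- the 'while left >= 0' loop; fuel = number of remaining iterations (= left+1).
-- cards[left] / cards[right-1] are ported with pyGetD 0: on every reached state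
-- 0 ≤ left < k < len and len-k ≤ right-1 < len, so the index is in range and
-- pyGetD is exact (Python never raises here).
def pvLoopA (cards : List Int) : Nat → Int → Int → Int → Int → Int
  | 0, _, _, pts, _ => pts
  | fuel + 1, left, right, pts, s =>
    let np := s - PySem.List.pyGetD cards left 0 + PySem.List.pyGetD cards (right - 1) 0
    pvLoopA cards fuel (left - 1) (right - 1) (max pts np) np

def max_points_from_cards (cards : List Int) (k : Int) : Int :=
  if k ≤ 0 then 0
  else if k ≥ (cards.length : Int) then cards.sum
  else
    let n : Int := cards.length
    let s := (PySem.List.slice cards none (some k)).sum   -- sum(cards[:k])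
    pvLoopA cards k.toNat (k - 1) n s s

-- ===== PORT B =====
-- _running from Source B: out=[]; acc=0; for x: out.append(acc); acc+=x; out.append(acc)
def pvRunning (xs : List Int) : List Int :=
  let st := xs.foldl (fun (st : List Int × Int) x => (st.1 ++ [st.2], st.2 + x)) ([], 0)
  st.1 ++ [st.2]

def max_points_from_cards_alt (cards : List Int) (k : Int) : Int :=
  if k ≤ 0 then 0
  else if k ≥ (cards.length : Int) then cards.sum
  else
    let pre := pvRunning (PySem.List.slice cards none (some k))       -- cards[:k]
    -- cards[-k:][::-1]: [::-1] is List.reverse (PySem.List.slice?_none_none_neg_one)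
    let suffix := pvRunning (PySem.List.slice cards (some (-k)) none).reverse
    let cands := List.zipWith (· + ·) pre suffix.reverse              -- suffix[::-1]
    -- max(cands): cands is nonempty (length k+1), so max? is some and getD is exact
    (PySem.List.max? cands (fun y => y)).getD 0

-- ===== PRECONDITION & SPEC =====
def Spec_max_points_from_cards (cards : List Int) (k : Int) (out : Int) : Prop := out = max_points_from_cards_alt cards k
instance (cards : List Int) (k : Int) (out : Int) : Decidable (Spec_max_points_from_cards cards k out) := by unfold Spec_max_points_from_cards; infer_instance

-- ===== CLAIM (what is proved, stated in full; the proofs are below) =====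
def Claim_equal_max_points_from_cards : Prop := ∀ (cards : List Int) (k : Int), Dom_max_points_from_cards cards k → Spec_max_points_from_cards cards k (max_points_from_cards cards k)

-- ===== LEMMAS AND PROOFS =====

-- split value: sum of the leftmost i cards plus sum of the rightmost K - i cards
def pvS (cards : List Int) (K N i : Nat) : Int :=
  (cards.take i).sum + (cards.drop (N - (K - i))).sum

-- fold max is a member of the start-value-plus-list
theorem pvFoldlMaxMem (l : List Int) : ∀ a : Int, l.foldl max a ∈ a :: l := by
  induction l with
  | nil => intro a; simp
  | cons x t ih =>
    intro a
    rw [List.foldl_cons]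
    have h := ih (max a x)
    rcases List.mem_cons.mp h with h' | h'
    · rw [h']; rcases max_choice a x with hc | hc <;> simp [hc]
    · simp [h']

-- folds of max over permuted (start :: list) bags agree
theorem pvFoldlMaxPerm (a b : Int) (l1 l2 : List Int)
    (h : (a :: l1).Perm (b :: l2)) : l1.foldl max a = l2.foldl max b := by
  have h1 := PySem.List.le_foldl_max l1 a
  have h2 := PySem.List.le_foldl_max l2 b
  have m1 : l1.foldl max a ∈ b :: l2 := h.mem_iff.mp (pvFoldlMaxMem l1 a)
  have m2 : l2.foldl max b ∈ a :: l1 := h.mem_iff.mpr (pvFoldlMaxMem l2 b)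
  apply le_antisymm
  · rcases List.mem_cons.mp m1 with h' | h'
    · exact h' ▸ h2.1
    · exact h2.2 _ h'
  · rcases List.mem_cons.mp m2 with h' | h'
    · exact h' ▸ h1.1
    · exact h1.2 _ h'

theorem pvRunAux (xs : List Int) : ∀ (out : List Int) (acc : Int),
    xs.foldl (fun (st : List Int × Int) x => (st.1 ++ [st.2], st.2 + x)) (out, acc)
      = (out ++ (List.range xs.length).map (fun i => acc + (xs.take i).sum), acc + xs.sum) := by
  induction xs with
  | nil => intro out acc; simp
  | cons x t ih =>
    intro out acc
    simp only [List.foldl_cons, ih (out ++ [acc]) (acc + x), List.length_cons,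
      List.range_succ_eq_map, List.map_cons, List.map_map, List.sum_cons]
    rw [Prod.mk.injEq]
    constructor
    · simp only [List.append_assoc, List.cons_append, List.nil_append, List.take_zero,
        List.sum_nil, add_zero]
      congr 2
      apply List.map_congr_left
      intro i _
      simp [List.take_succ_cons, add_assoc]
    · ring

theorem pvRunning_eq (xs : List Int) :
    pvRunning xs = (List.range (xs.length + 1)).map (fun i => (xs.take i).sum) := by
  simp only [pvRunning, pvRunAux xs [] 0, List.nil_append, List.range_succ, List.map_append,
    List.map_singleton]
  congr 1
  · apply List.map_congr_left; intro i _; simp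
  · simp [List.take_of_length_le (le_refl xs.length)]

-- the window step: moving the split from i+1 to i swaps card i for card (N-K+i)
theorem pvS_step (cards : List Int) (K N m : Nat) (hN : N = cards.length)
    (hm : m < K) (hKN : K < N) :
    pvS cards K N m = pvS cards K N (m + 1) - cards.getD m 0 + cards.getD (N - K + m) 0 := by
  have hmN : m < cards.length := by omega
  have hiN : N - K + m < cards.length := by omega
  have h1 : cards.take (m + 1) = cards.take m ++ [cards[m]] := by
    rw [List.take_add_one]
    simp [List.getElem?_eq_getElem hmN]
  have h2 : cards.drop (N - K + m) = cards[N - K + m] :: cards.drop (N - K + m + 1) := by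
    exact List.drop_eq_getElem_cons hiN
  have e1 : N - (K - m) = N - K + m := by omega
  have e2 : N - (K - (m + 1)) = N - K + m + 1 := by omega
  simp only [pvS, e1, e2, h1, h2, List.sum_append, List.sum_cons, List.sum_nil,
    List.getD_eq_getElem _ _ hmN, List.getD_eq_getElem _ _ hiN, add_zero]
  ring

-- A's loop computes the max of pts and the splits pvS (m-1), …, pvS 0
theorem pvLoopA_eq (cards : List Int) (K N : Nat) (hN : N = cards.length) (hKN : K < N) :
    ∀ m, m ≤ K → ∀ pts : Int,
      pvLoopA cards m ((m : Int) - 1) ((N : Int) - (K : Int) + (m : Int)) pts (pvS cards K N m)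
        = ((List.range m).reverse.map (pvS cards K N)).foldl max pts := by
  intro m
  induction m with
  | zero => intro _ pts; simp [pvLoopA]
  | succ m ih =>
    intro hm pts
    have hm' : m ≤ K := by omega
    have hmlen : m < cards.length := by omega
    have hilen : N - K + m < cards.length := by omega
    have eL : ((m : Int) + 1 - 1) = ((m : Nat) : Int) := by ring
    have eR : ((N : Int) - (K : Int) + ((m : Nat) + 1 : Int) - 1) = ((N - K + m : Nat) : Int) := by
      push_cast; omega
    have np_eq :
        pvS cards K N (m + 1) - PySem.List.pyGetD cards ((m : Int) + 1 - 1) 0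
          + PySem.List.pyGetD cards ((N : Int) - (K : Int) + ((m : Nat) + 1 : Int) - 1) 0
          = pvS cards K N m := by
      rw [eL, eR, PySem.List.pyGetD_natCast, PySem.List.pyGetD_natCast]
      exact (pvS_step cards K N m hN (by omega) hKN).symm
    have unf : pvLoopA cards (m + 1) ((↑(m + 1) : Int) - 1)
        ((N : Int) - (K : Int) + (↑(m + 1) : Int)) pts (pvS cards K N (m + 1))
        = pvLoopA cards m ((↑(m + 1) : Int) - 1 - 1)
            ((N : Int) - (K : Int) + (↑(m + 1) : Int) - 1)
            (max pts (pvS cards K N m)) (pvS cards K N m) := by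
      simp only [pvLoopA]
      push_cast at np_eq ⊢
      rw [np_eq]
    rw [unf]
    have eL2 : ((↑(m + 1) : Int) - 1 - 1) = ((m : Nat) : Int) - 1 := by push_cast; ring
    have eR2 : ((N : Int) - (K : Int) + (↑(m + 1) : Int) - 1)
        = ((N : Int) - (K : Int) + ((m : Nat) : Int)) := by push_cast; ring
    rw [eL2, eR2, ih hm' (max pts (pvS cards K N m))]
    simp [List.range_succ]

-- rewriting A into max over all splits, started at the full-prefix split
theorem pvA_eq (cards : List Int) (k : Int) (h0 : ¬ k ≤ 0) (h1 : ¬ k ≥ (cards.length : Int)) :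
    max_points_from_cards cards k
      = ((List.range k.toNat).reverse.map (pvS cards k.toNat cards.length)).foldl max
          (pvS cards k.toNat cards.length k.toNat) := by
  have hk : (k.toNat : Int) = k := Int.toNat_of_nonneg (by omega)
  have hKN : k.toNat < cards.length := by omega
  have hs : (PySem.List.slice cards none (some k)).sum = pvS cards k.toNat cards.length k.toNat := by
    rw [PySem.List.slice_to cards (by omega : (0:Int) ≤ k)]
    simp [pvS, List.drop_length]
  have := pvLoopA_eq cards k.toNat cards.length rfl hKN k.toNat (le_refl _)
    (pvS cards k.toNat cards.length k.toNat)
  simp only [max_points_from_cards, if_neg h0, if_neg h1, hs]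
  rw [← this, hk]
  norm_num

-- B's candidate list is exactly the splits pvS 0, …, pvS K in order
theorem pvB_cands (cards : List Int) (k : Int) (h0 : ¬ k ≤ 0) (h1 : ¬ k ≥ (cards.length : Int)) :
    List.zipWith (· + ·) (pvRunning (PySem.List.slice cards none (some k)))
        (pvRunning (PySem.List.slice cards (some (-k)) none).reverse).reverse
      = (List.range (k.toNat + 1)).map (pvS cards k.toNat cards.length) := by
  set K := k.toNat with hKdef
  set N := cards.length with hNdef
  have hk : (K : Int) = k := Int.toNat_of_nonneg (by omega)
  have hK0 : 0 < K := by omega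
  have hKN : K < N := by omega
  have hpre : PySem.List.slice cards none (some k) = cards.take K := by
    rw [PySem.List.slice_to cards (by omega : (0:Int) ≤ k)]
  have hsuf : PySem.List.slice cards (some (-k)) none = cards.drop (N - K) := by
    rw [← hk, PySem.List.slice_from_neg_natCast cards K hK0]
  have lpre : (cards.take K).length = K := by simp; omega
  have lsuf : ((cards.drop (N - K)).reverse).length = K := by simp; omega
  apply List.ext_getElem
  · simp [hpre, hsuf, pvRunning_eq, lpre, lsuf]
  · intro i hi1 hi2
    have hiK : i < K + 1 := by
      simpa [hpre, hsuf, pvRunning_eq, lpre, lsuf] using hi1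
    rw [List.getElem_zipWith, List.getElem_map, List.getElem_range]
    rw [List.getElem_reverse]
    simp only [hpre, hsuf, pvRunning_eq, lpre, lsuf, List.getElem_map, List.getElem_range]
    have hlen : (List.range (K + 1)).length = K + 1 := List.length_range
    have htake : (cards.take K).take i = cards.take i := by
      rw [List.take_take]; congr 1; omega
    rw [htake]
    congr 1
    -- suffix side: sum of the first (K - i) of the reversed tail = sum of the last K - i cards
    have hlen2 : (cards.drop (N - K)).length = K := by simp; omega
    simp only [List.length_map, List.length_range]
    rw [List.take_reverse, List.sum_reverse, List.drop_drop, hlen2]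
    congr 2
    omega

-- the two starts-plus-lists are permutations of each other
theorem pvPerm (cards : List Int) (K N : Nat) :
    (pvS cards K N K :: (List.range K).reverse.map (pvS cards K N)).Perm
      (pvS cards K N 0 :: (List.range K).map (fun i => pvS cards K N (i + 1))) := by
  have h1 : (pvS cards K N K :: (List.range K).reverse.map (pvS cards K N)).Perm
      ((List.range (K + 1)).map (pvS cards K N)) := by
    rw [List.range_succ, List.map_append, List.map_singleton]
    exact (List.Perm.cons _ ((List.reverse_perm (List.range K)).map (pvS cards K N))).trans
      (List.perm_append_singleton _ _).symm
  have h2 : (List.range (K + 1)).map (pvS cards K N)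
      = pvS cards K N 0 :: (List.range K).map (fun i => pvS cards K N (i + 1)) := by
    rw [List.range_succ_eq_map]
    simp [List.map_map, Function.comp]
  exact h2 ▸ h1

-- ===== VERDICT (by name: the statement is the Claim_ definition above) =====
theorem max_points_from_cards_spec : Claim_equal_max_points_from_cards := by
  intro cards k _
  unfold Spec_max_points_from_cards
  by_cases h0 : k ≤ 0
  · simp [max_points_from_cards, max_points_from_cards_alt, h0]
  · by_cases h1 : k ≥ (cards.length : Int)
    · simp [max_points_from_cards, max_points_from_cards_alt, h0, h1]
    · rw [pvA_eq cards k h0 h1]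
      have hB : max_points_from_cards_alt cards k
          = (PySem.List.max? ((List.range (k.toNat + 1)).map (pvS cards k.toNat cards.length))
              (fun y => y)).getD 0 := by
        simp only [max_points_from_cards_alt, if_neg h0, if_neg h1]
        rw [pvB_cands cards k h0 h1]
      rw [hB, List.range_succ_eq_map, List.map_cons, List.map_map,
        PySem.List.max?_id_cons, Option.getD_some]
      exact pvFoldlMaxPerm _ _ _ _ (pvPerm cards k.toNat cards.length)
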